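-- pv_equiv track=rewrite | github.com/nixxholas/IS111-rekt | LabTest/LT2 Trial/hwchen.2020/q1b.py | find_second_letter
-- ===== SOURCE A (Python) =====
-- import string
--
-- def find_second_letter(my_str):
--     counted = False
--     for i in range(len(my_str)):
--         if my_str[i] in string.ascii_letters and counted:
--             return i
--         elif my_str[i] in string.ascii_letters and not counted:
--             counted = True
--     return -1
-- ===== SOURCE B (Python) =====
-- import string
--
-- def find_second_letter(my_str):
--     letter_positions = [i for i, c in enumerate(my_str) if c in string.ascii_letters]
--     return letter_positions[1] if len(letter_positions) >= 2 else -1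
-- ===== Notes on version B (the rewrite author's own statement) =====
-- stated objective: simpler
-- what changed: Replaced the flag-and-early-return loop with a two-phase strategy: build the list of all letter indices via a comprehension over enumerate, then select element 1 if it exists, else -1.
import Mathlib
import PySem

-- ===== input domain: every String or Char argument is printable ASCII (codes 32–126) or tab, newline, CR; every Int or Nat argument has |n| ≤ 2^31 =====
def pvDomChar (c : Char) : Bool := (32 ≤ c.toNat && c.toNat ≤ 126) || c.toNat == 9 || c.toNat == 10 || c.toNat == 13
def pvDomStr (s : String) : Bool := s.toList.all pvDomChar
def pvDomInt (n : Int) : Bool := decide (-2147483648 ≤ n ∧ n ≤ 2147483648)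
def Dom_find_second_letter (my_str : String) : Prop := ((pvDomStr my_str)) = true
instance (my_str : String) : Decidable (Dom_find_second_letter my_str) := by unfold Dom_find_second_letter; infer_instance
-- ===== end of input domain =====

-- B replaces A's flag-and-early-return scan with "collect all letter indices, take element 1" (objective: simpler decomposition; same cost).

-- membership test `c in string.ascii_letters` (exact for single characters)
def isAsciiLetter (c : Char) : Bool := ('A' ≤ c && c ≤ 'Z') || ('a' ≤ c && c ≤ 'z')

-- ===== PORT A =====
-- the for-loop over range(len(my_str)) with the `counted` flag and early return
def fslLoopA : List Char → Nat → Bool → Int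
  | [], _, _ => -1
  | c :: rest, i, counted =>
    if isAsciiLetter c && counted then (i : Int)
    else if isAsciiLetter c && !counted then fslLoopA rest (i + 1) true
    else fslLoopA rest (i + 1) counted

def find_second_letter (my_str : String) : Int := fslLoopA my_str.toList 0 false

-- ===== PORT B =====
def find_second_letter_alt (my_str : String) : Int :=
  let letter_positions :=
    ((PySem.List.enumerate my_str.toList 0).filter (fun p => isAsciiLetter p.2)).map (fun p => p.1)
  match letter_positions with
  | _ :: j :: _ => j
  | _ => -1

-- ===== PRECONDITION & SPEC =====
def Spec_find_second_letter (my_str : String) (out : Int) : Prop := out = find_second_letter_alt my_str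
instance (my_str : String) (out : Int) : Decidable (Spec_find_second_letter my_str out) := by unfold Spec_find_second_letter; infer_instance

-- ===== CLAIM (what is proved, stated in full; the proofs are below) =====
def Claim_equal_find_second_letter : Prop := ∀ (my_str : String), Dom_find_second_letter my_str → Spec_find_second_letter my_str (find_second_letter my_str)

-- ===== LEMMAS AND PROOFS =====

-- letter indices of cs, numbered from s (B's intermediate list, generalized)
def idxsOf (cs : List Char) (s : Int) : List Int :=
  ((PySem.List.enumerate cs s).filter (fun p => isAsciiLetter p.2)).map (fun p => p.1)

def sel0 : List Int → Int
  | j :: _ => j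
  | [] => -1

def sel1 : List Int → Int
  | _ :: j :: _ => j
  | _ => -1

theorem sel0_cons (j : Int) (l : List Int) : sel0 (j :: l) = j := rfl

theorem sel1_cons (j : Int) (l : List Int) : sel1 (j :: l) = sel0 l := by
  cases l <;> rfl

theorem idxsOf_cons (c : Char) (cs : List Char) (s : Int) :
    idxsOf (c :: cs) s =
      if isAsciiLetter c then s :: idxsOf cs (s + 1) else idxsOf cs (s + 1) := by
  simp only [idxsOf, PySem.List.enumerate_cons, List.filter_cons]
  by_cases h : isAsciiLetter c <;> simp [h]

theorem fslLoopA_eq (cs : List Char) : ∀ i : Nat,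
    fslLoopA cs i false = sel1 (idxsOf cs (i : Int)) ∧
    fslLoopA cs i true = sel0 (idxsOf cs (i : Int)) := by
  induction cs with
  | nil => intro i; simp [fslLoopA, idxsOf, PySem.List.enumerate, sel0, sel1]
  | cons c cs ih =>
    intro i
    have hi : ((i : Int) + 1) = ((i + 1 : Nat) : Int) := by push_cast; ring
    rw [idxsOf_cons, hi]
    by_cases h : isAsciiLetter c
    · rw [if_pos h]
      refine ⟨?_, ?_⟩
      · rw [sel1_cons, show fslLoopA (c :: cs) i false = fslLoopA cs (i + 1) true by
          simp [fslLoopA, h]]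
        exact (ih (i + 1)).2
      · rw [sel0_cons, show fslLoopA (c :: cs) i true = (i : Int) by simp [fslLoopA, h]]
    · rw [if_neg h]
      refine ⟨?_, ?_⟩
      · rw [show fslLoopA (c :: cs) i false = fslLoopA cs (i + 1) false by simp [fslLoopA, h]]
        exact (ih (i + 1)).1
      · rw [show fslLoopA (c :: cs) i true = fslLoopA cs (i + 1) true by simp [fslLoopA, h]]
        exact (ih (i + 1)).2

-- ===== VERDICT (by name: the statement is the Claim_ definition above) =====
theorem find_second_letter_spec : Claim_equal_find_second_letter := by
  intro my_str _
  show find_second_letter my_str = find_second_letter_alt my_str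
  have h := (fslLoopA_eq my_str.toList 0).1
  simp only [find_second_letter, find_second_letter_alt]
  rw [h]
  rfl
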